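-- pv_equiv track=rewrite | github.com/AllanGomez5678/AllanGomez_PGY1121_002_Diurno | funciones.py | comprobarAsiento
-- ===== SOURCE A (Python) =====
-- def comprobarAsiento(arreglo,num_entrada):
--     x = 0
--     for f in range(10):
--         for c in range(10):
--             x = x + 1
--             if str(x) == str(num_entrada):
--                 if arreglo[f][c] == 'XX':
--                     return False
--     return True
-- ===== SOURCE B (Python) =====
-- def comprobarAsiento(arreglo, num_entrada):
--     # Direct seat arithmetic instead of scanning the 10x10 grid.
--     if 1 <= num_entrada <= 100:
--         f, c = divmod(num_entrada - 1, 10)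
--         return arreglo[f][c] != 'XX'
--     return True
-- ===== Notes on version B (the rewrite author's own statement) =====
-- stated objective: simpler
-- what changed: Replaces the 100-cell nested scan with string comparisons at every cell by a direct divmod computation of the seat's row and column, indexing the grid once.
import Mathlib
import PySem

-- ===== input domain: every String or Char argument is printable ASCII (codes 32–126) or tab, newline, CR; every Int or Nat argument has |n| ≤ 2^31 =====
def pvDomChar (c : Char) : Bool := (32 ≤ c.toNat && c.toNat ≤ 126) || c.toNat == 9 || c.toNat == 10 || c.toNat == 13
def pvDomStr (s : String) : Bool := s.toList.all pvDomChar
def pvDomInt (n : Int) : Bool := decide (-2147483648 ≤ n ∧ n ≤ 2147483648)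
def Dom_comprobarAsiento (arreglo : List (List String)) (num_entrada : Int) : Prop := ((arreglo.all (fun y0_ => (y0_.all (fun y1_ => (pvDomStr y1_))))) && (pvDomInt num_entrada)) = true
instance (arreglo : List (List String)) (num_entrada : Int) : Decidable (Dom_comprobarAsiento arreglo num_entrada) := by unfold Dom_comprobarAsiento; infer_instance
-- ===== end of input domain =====

-- B replaces A's 100-cell scan (with str comparisons at every cell) by computing the
-- seat's row/column directly with divmod and indexing the grid once.

-- ===== PORT A =====
-- inner 'for c in range(10)' with the early 'return False' (some false = early return, Int = the running x)
def pvRowLoop (arreglo : List (List String)) (num : Int) (f : Int) : List Int → Int → Option Bool × Int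
  | [], x => (none, x)
  | c :: rest, x =>
      let x' := x + 1
      if PySem.Int.toStr x' == PySem.Int.toStr num then
        if PySem.List.pyGetD (PySem.List.pyGetD arreglo f []) c "" == "XX" then (some false, x')
        else pvRowLoop arreglo num f rest x'
      else pvRowLoop arreglo num f rest x'

-- outer 'for f in range(10)'
def pvGridLoop (arreglo : List (List String)) (num : Int) : List Int → Int → Option Bool × Int
  | [], x => (none, x)
  | f :: rest, x =>
      match pvRowLoop arreglo num f (PySem.List.pyRange 0 10 1) x with
      | (some b, x') => (some b, x')
      | (none, x') => pvGridLoop arreglo num rest x'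

def comprobarAsiento (arreglo : List (List String)) (num_entrada : Int) : Bool :=
  match pvGridLoop arreglo num_entrada (PySem.List.pyRange 0 10 1) 0 with
  | (some b, _) => b
  | (none, _) => true

-- ===== PORT B =====
def comprobarAsiento_alt (arreglo : List (List String)) (num_entrada : Int) : Bool :=
  if 1 ≤ num_entrada ∧ num_entrada ≤ 100 then
    let f := PySem.Int.floordiv (num_entrada - 1) 10
    let c := PySem.Int.mod (num_entrada - 1) 10
    !(PySem.List.pyGetD (PySem.List.pyGetD arreglo f []) c "" == "XX")
  else true

-- ===== PRECONDITION & SPEC =====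
-- Pre_ excludes exactly the inputs on which the Python A raises IndexError: a ticket
-- number in 1..100 whose seat position lies outside the given grid (B raises there too).
def Pre_comprobarAsiento (arreglo : List (List String)) (num_entrada : Int) : Prop :=
  (1 ≤ num_entrada ∧ num_entrada ≤ 100) →
    (((num_entrada - 1) / 10).toNat < arreglo.length ∧
     ((num_entrada - 1) % 10).toNat < (arreglo.getD ((num_entrada - 1) / 10).toNat []).length)
instance (arreglo : List (List String)) (num_entrada : Int) : Decidable (Pre_comprobarAsiento arreglo num_entrada) := by unfold Pre_comprobarAsiento; infer_instance

def pvWitness_comprobarAsiento : List (List String) × Int := ([["OK"]], 1)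

def Spec_comprobarAsiento (arreglo : List (List String)) (num_entrada : Int) (out : Bool) : Prop := out = comprobarAsiento_alt arreglo num_entrada
instance (arreglo : List (List String)) (num_entrada : Int) (out : Bool) : Decidable (Spec_comprobarAsiento arreglo num_entrada out) := by unfold Spec_comprobarAsiento; infer_instance

-- ===== CLAIM (what is proved, stated in full; the proofs are below) =====
def Claim_equal_comprobarAsiento : Prop := ∀ (arreglo : List (List String)) (num_entrada : Int), Dom_comprobarAsiento arreglo num_entrada → Pre_comprobarAsiento arreglo num_entrada → Spec_comprobarAsiento arreglo num_entrada (comprobarAsiento arreglo num_entrada)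

-- ===== LEMMAS AND PROOFS =====

-- decoder for digit strings: (value, place)
def pvDec : List Char → Nat × Nat
  | [] => (0, 1)
  | c :: cs => ((pvDec cs).1 + (c.toNat - 48) * (pvDec cs).2, 10 * (pvDec cs).2)

lemma pvDigitChar_val : ∀ r : Nat, r < 10 → (Nat.digitChar r).toNat - 48 = r := by decide

lemma pvDigitChar_ne_minus : ∀ r : Nat, r < 10 → Nat.digitChar r ≠ '-' := by decide

lemma pvDec_toDigitsCore : ∀ (fuel n : Nat) (ds : List Char), n < fuel →
    (pvDec (Nat.toDigitsCore 10 fuel n ds)).1 = (pvDec ds).1 + n * (pvDec ds).2 := by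
  intro fuel
  induction fuel with
  | zero => intro n ds h; omega
  | succ f ih =>
    intro n ds h
    simp only [Nat.toDigitsCore]
    by_cases h0 : n / 10 = 0
    · simp only [h0, if_true]
      simp only [pvDec]
      rw [pvDigitChar_val (n % 10) (Nat.mod_lt _ (by omega))]
      rw [Nat.mod_eq_of_lt (by omega)]
    · rw [if_neg h0]
      rw [ih (n / 10) (Nat.digitChar (n % 10) :: ds) (by omega)]
      simp only [pvDec]
      rw [pvDigitChar_val (n % 10) (Nat.mod_lt _ (by omega))]
      have := Nat.div_add_mod n 10
      nlinarith [this]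

lemma pvToDigits_inj (a b : Nat) (h : Nat.toDigits 10 a = Nat.toDigits 10 b) : a = b := by
  have ha := pvDec_toDigitsCore (a + 1) a [] (by omega)
  have hb := pvDec_toDigitsCore (b + 1) b [] (by omega)
  unfold Nat.toDigits at h
  rw [h] at ha
  simp [pvDec] at ha hb
  omega

lemma pvToDigits_no_minus : ∀ (fuel n : Nat) (ds : List Char),
    (∀ c ∈ ds, c ≠ '-') → ∀ c ∈ Nat.toDigitsCore 10 fuel n ds, c ≠ '-' := by
  intro fuel
  induction fuel with
  | zero => intro n ds hds; simpa [Nat.toDigitsCore] using hds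
  | succ f ih =>
    intro n ds hds c hc
    simp only [Nat.toDigitsCore] at hc
    by_cases h0 : n / 10 = 0
    · rw [if_pos h0] at hc
      rcases List.mem_cons.mp hc with h | h
      · subst h; exact pvDigitChar_ne_minus _ (Nat.mod_lt _ (by omega))
      · exact hds c h
    · rw [if_neg h0] at hc
      refine ih (n / 10) _ ?_ c hc
      intro d hd
      rcases List.mem_cons.mp hd with h | h
      · subst h; exact pvDigitChar_ne_minus _ (Nat.mod_lt _ (by omega))
      · exact hds d h

lemma pvToStr_inj (m n : Int) (h : PySem.Int.toStr m = PySem.Int.toStr n) : m = n := by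
  have h2 : PySem.Int.toChars m = PySem.Int.toChars n := by
    rw [← PySem.Int.toList_toStr, ← PySem.Int.toList_toStr, h]
  unfold PySem.Int.toChars at h2
  by_cases hm : m < 0 <;> by_cases hn : n < 0
  · rw [if_pos hm, if_pos hn] at h2
    have := pvToDigits_inj m.natAbs n.natAbs (List.cons_injective h2)
    omega
  · rw [if_pos hm, if_neg hn] at h2
    exfalso
    exact pvToDigits_no_minus _ _ [] (by simp) '-' (h2 ▸ List.mem_cons_self) rfl
  · rw [if_neg hm, if_pos hn] at h2
    exfalso
    exact pvToDigits_no_minus _ _ [] (by simp) '-' (h2.symm ▸ List.mem_cons_self) rfl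
  · rw [if_neg hm, if_neg hn] at h2
    have := pvToDigits_inj m.toNat n.toNat h2
    omega

lemma pvToStr_beq_false (m n : Int) (h : m ≠ n) :
    (PySem.Int.toStr m == PySem.Int.toStr n) = false := by
  rw [beq_eq_false_iff_ne]
  exact fun he => h (pvToStr_inj m n he)

lemma pvRange10 : PySem.List.pyRange 0 10 1 = [0,1,2,3,4,5,6,7,8,9] := by decide

lemma pvRange10_getD : ∀ j : Nat, j < 10 → ([0,1,2,3,4,5,6,7,8,9] : List Int).getD j 0 = (j : Int) := by
  decide

lemma pvRowLoop_miss (arr : List (List String)) (n f : Int) :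
    ∀ (cs : List Int) (x : Int), (∀ i : Nat, i < cs.length → x + 1 + i ≠ n) →
    pvRowLoop arr n f cs x = (none, x + cs.length) := by
  intro cs
  induction cs with
  | nil => intro x _; simp [pvRowLoop]
  | cons c rest ih =>
    intro x hmiss
    simp only [pvRowLoop]
    rw [pvToStr_beq_false (x + 1) n (by have := hmiss 0 (by simp); simpa using this)]
    simp only [Bool.false_eq_true, if_false]
    rw [ih (x + 1) (fun i hi => by have := hmiss (i + 1) (by simpa using hi); push_cast at this ⊢; omega)]
    simp only [List.length_cons]
    congr 1
    push_cast
    ring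

lemma pvRowLoop_hit (arr : List (List String)) (n f : Int) :
    ∀ (cs : List Int) (x : Int) (j : Nat), j < cs.length → x + 1 + j = n →
    pvRowLoop arr n f cs x =
      (if PySem.List.pyGetD (PySem.List.pyGetD arr f []) (cs.getD j 0) "" == "XX"
       then (some false, n) else (none, x + cs.length)) := by
  intro cs
  induction cs with
  | nil => intro x j hj; simp at hj
  | cons c rest ih =>
    intro x j hj hhit
    simp only [pvRowLoop]
    cases j with
    | zero =>
      have hx1 : x + 1 = n := by simpa using hhit
      have hbeq : (PySem.Int.toStr (x + 1) == PySem.Int.toStr n) = true := by rw [hx1]; simp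
      simp only [hbeq, if_true, List.getD_cons_zero]
      by_cases hseat : PySem.List.pyGetD (PySem.List.pyGetD arr f []) c "" == "XX"
      · simp [hseat, hx1]
      · simp only [Bool.not_eq_true] at hseat
        simp only [hseat, Bool.false_eq_true, if_false]
        rw [pvRowLoop_miss arr n f rest (x + 1) (fun i _ => by omega)]
        simp only [List.length_cons]
        congr 1
        push_cast
        ring
    | succ k =>
      have hne : x + 1 ≠ n := by push_cast at hhit; omega
      rw [pvToStr_beq_false (x + 1) n hne]
      simp only [Bool.false_eq_true, if_false, List.getD_cons_succ]
      rw [ih (x + 1) k (by simpa using hj) (by push_cast at hhit ⊢; omega)]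
      simp only [List.length_cons]
      by_cases hseat : PySem.List.pyGetD (PySem.List.pyGetD arr f []) (rest.getD k 0) "" == "XX" <;>
        simp only [hseat, Bool.false_eq_true, if_true, if_false]
      congr 1
      push_cast
      ring

lemma pvGridLoop_miss (arr : List (List String)) (n : Int) :
    ∀ (fs : List Int) (x : Int), (∀ i : Nat, i < 10 * fs.length → x + 1 + i ≠ n) →
    pvGridLoop arr n fs x = (none, x + 10 * fs.length) := by
  intro fs
  induction fs with
  | nil => intro x _; simp [pvGridLoop]
  | cons f rest ih =>
    intro x hmiss
    simp only [pvGridLoop, pvRange10]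
    rw [pvRowLoop_miss arr n f _ x (fun i hi => by
      have := hmiss i (by simp at hi ⊢; omega)
      exact this)]
    norm_num
    rw [ih (x + 10) (fun i hi => by
      have := hmiss (i + 10) (by simp at hi ⊢; omega)
      push_cast at this ⊢; omega)]
    show (none, x + (10:Nat) + 10 * rest.length) = (none, x + 10 * ((rest.length : Int) + 1))
    congr 1
    push_cast
    ring

lemma pvGridLoop_hit (arr : List (List String)) (n : Int) :
    ∀ (fs : List Int) (x : Int) (j : Nat), j < fs.length →
    x + 10 * j < n → n ≤ x + 10 * j + 10 →
    pvGridLoop arr n fs x =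
      (if PySem.List.pyGetD (PySem.List.pyGetD arr (fs.getD j 0) []) (n - 1 - (x + 10 * j)) "" == "XX"
       then (some false, n) else (none, x + 10 * fs.length)) := by
  intro fs
  induction fs with
  | nil => intro x j hj; simp at hj
  | cons f rest ih =>
    intro x j hj hlo hhi
    simp only [pvGridLoop, pvRange10]
    cases j with
    | zero =>
      simp only [Nat.cast_zero, mul_zero, add_zero] at hlo hhi ⊢
      have hj' : (n - x - 1).toNat < 10 := by omega
      have hx : x + 1 + ((n - x - 1).toNat : Int) = n := by omega
      rw [pvRowLoop_hit arr n f _ x (n - x - 1).toNat (by simpa using hj') hx]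
      rw [pvRange10_getD _ hj']
      have hcol : ((n - x - 1).toNat : Int) = n - 1 - x := by omega
      rw [hcol]
      simp only [List.getD_cons_zero]
      by_cases hseat : PySem.List.pyGetD (PySem.List.pyGetD arr f []) (n - 1 - x) "" == "XX"
      · simp [hseat]
      · simp only [Bool.not_eq_true] at hseat
        simp only [hseat, Bool.false_eq_true, if_false]
        have h10 : ((([0,1,2,3,4,5,6,7,8,9] : List Int)).length : Int) = 10 := by decide
        rw [h10]
        rw [pvGridLoop_miss arr n rest (x + 10) (fun i _ => by omega)]
        simp only [List.length_cons]
        congr 1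
        push_cast
        ring
    | succ k =>
      have hmiss : ∀ i : Nat, i < ([0,1,2,3,4,5,6,7,8,9] : List Int).length → x + 1 + i ≠ n := by
        intro i hi
        simp at hi
        push_cast at hlo ⊢
        omega
      rw [pvRowLoop_miss arr n f _ x hmiss]
      have h10 : ((([0,1,2,3,4,5,6,7,8,9] : List Int)).length : Int) = 10 := by decide
      rw [h10]
      simp only [List.getD_cons_succ]
      rw [ih (x + 10) k (by simpa using hj) (by push_cast at hlo ⊢; omega)
          (by push_cast at hhi ⊢; omega)]
      have e1 : x + 10 + 10 * (k : Int) = x + 10 * ((k : Nat) + 1 : Nat) := by push_cast; ring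
      by_cases hseat : PySem.List.pyGetD (PySem.List.pyGetD arr (rest.getD k 0) [])
          (n - 1 - (x + 10 + 10 * (k : Int))) "" == "XX"
      · rw [if_pos hseat, if_pos (by rw [← e1] at *; exact hseat)]
      · rw [if_neg hseat, if_neg (by rw [← e1] at *; exact hseat)]
        simp only [List.length_cons]
        congr 1
        push_cast
        ring

lemma pvFloordiv_pos (a : Int) (_h : 0 ≤ a) : PySem.Int.floordiv a 10 = a / 10 := by
  simp [PySem.Int.floordiv, Int.fdiv_eq_ediv]

lemma pvMod_pos (a : Int) : PySem.Int.mod a 10 = a % 10 := by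
  simp [PySem.Int.mod, Int.fmod_eq_emod]

-- ===== VERDICT (by name: the statement is the Claim_ definition above) =====
theorem comprobarAsiento_spec : Claim_equal_comprobarAsiento := by
  intro arr n _hdom _hpre
  unfold Spec_comprobarAsiento comprobarAsiento comprobarAsiento_alt
  by_cases hn : 1 ≤ n ∧ n ≤ 100
  · rw [if_pos hn]
    obtain ⟨h1, h100⟩ := hn
    have hj : ((n - 1) / 10).toNat < 10 := by omega
    have hlo : (0 : Int) + 10 * (((n - 1) / 10).toNat : Int) < n := by omega
    have hhi : n ≤ (0 : Int) + 10 * (((n - 1) / 10).toNat : Int) + 10 := by omega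
    rw [pvRange10, pvGridLoop_hit arr n _ 0 ((n - 1) / 10).toNat (by simpa using hj) hlo hhi]
    rw [pvRange10_getD _ hj]
    rw [pvFloordiv_pos (n - 1) (by omega), pvMod_pos]
    have hc : n - 1 - ((0 : Int) + 10 * (((n - 1) / 10).toNat : Int)) = (n - 1) % 10 := by omega
    have hq : (((n - 1) / 10).toNat : Int) = (n - 1) / 10 := by omega
    rw [hc, hq]
    by_cases hseat : PySem.List.pyGetD (PySem.List.pyGetD arr ((n - 1) / 10) []) ((n - 1) % 10) "" == "XX"
    · simp [hseat]
    · simp only [Bool.not_eq_true] at hseat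
      simp [hseat]
  · rw [if_neg hn]
    rw [pvRange10, pvGridLoop_miss arr n _ 0 (fun i hi => by
      simp at hi
      push_cast
      omega)]
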